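-- pv_equiv track=rewrite | github.com/infernarium/TaskGenerator | Псевдобулевская/Solver.py | transformation_t
-- ===== SOURCE A (Python) =====
-- def transformation_t(a, b, k):
--     y = []
--     d = k
--     for i in range(len(a)):
--         if a[i] > b[i]:
--             y.append({'iter': i,
--                       'inv': 0,
--                       'coef': a[i] - b[i]})
--             d -= b[i]
--         else:
--             y.append({'iter': i,
--                       'inv': 1,
--                       'coef': b[i] - a[i]})
--             d -= a[i]
--
--     y.sort(key=lambda item: item['coef'], reverse=True)
--     return y, d
-- ===== SOURCE B (Python) =====
-- def transformation_t(a, b, k):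
--     y = []
--     for i, (ai, bi) in enumerate(zip(a, b)):
--         e = {'iter': i, 'inv': int(ai <= bi), 'coef': abs(ai - bi)}
--         # binary search for the first position whose coef is strictly smaller
--         # (y is kept descending; ties keep insertion order, i.e. stable)
--         lo, hi = 0, len(y)
--         while lo < hi:
--             mid = (lo + hi) // 2
--             if y[mid]['coef'] >= e['coef']:
--                 lo = mid + 1
--             else:
--                 hi = mid
--         y.insert(lo, e)
--     return y, k - sum(map(min, zip(a, b)))
-- ===== Notes on version B (the rewrite author's own statement) =====
-- stated objective: alternative
-- what changed: Instead of appending entries in index order and then calling the library sort, B keeps y sorted at all times by binary-searching (hand-written lo/hi loop) the descending position of each branchless abs/min entry and inserting it there, and computes the residual separately as k - sum(map(min, zip(a,b))).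
import Mathlib
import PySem

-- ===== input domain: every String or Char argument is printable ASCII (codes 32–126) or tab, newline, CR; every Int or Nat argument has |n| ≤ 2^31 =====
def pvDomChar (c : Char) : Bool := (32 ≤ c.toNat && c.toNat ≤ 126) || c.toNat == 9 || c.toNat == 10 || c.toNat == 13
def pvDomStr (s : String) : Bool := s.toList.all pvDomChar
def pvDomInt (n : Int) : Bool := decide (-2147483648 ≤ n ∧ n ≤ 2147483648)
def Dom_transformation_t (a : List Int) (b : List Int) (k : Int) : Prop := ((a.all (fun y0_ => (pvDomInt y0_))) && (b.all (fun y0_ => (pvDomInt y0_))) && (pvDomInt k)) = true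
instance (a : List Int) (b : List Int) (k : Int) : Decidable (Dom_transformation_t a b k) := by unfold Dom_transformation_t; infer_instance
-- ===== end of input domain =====

-- B replaces A's append-then-library-sort loop by an online binary insertion sort: each
-- branchless abs/min entry is inserted at its binary-searched descending position, and the
-- residual is computed separately as k - sum(map(min, zip(a,b))); objective: alternative.

-- ===== PORT A =====
-- A's single loop: builds y and updates d together, branching on a[i] > b[i]; then y.sort(reverse=True).
def transformation_t (a : List Int) (b : List Int) (k : Int) : (List (List (String × Int))) × Int :=
  let st := (List.range a.length).foldl
    (fun (st : (List (List (String × Int))) × Int) i =>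
      let ai := a.getD i 0
      let bi := PySem.List.pyGetD b (i : Int) 0
      if ai > bi then
        (st.1 ++ [[("iter", (i : Int)), ("inv", 0), ("coef", ai - bi)]], st.2 - bi)
      else
        (st.1 ++ [[("iter", (i : Int)), ("inv", 1), ("coef", bi - ai)]], st.2 - ai))
    ([], k)
  (PySem.List.sorted st.1 (fun item => (item.lookup "coef").getD 0) true, st.2)

-- ===== PORT B =====
-- B's while-loop binary search: first position in the descending list y whose coef is
-- strictly below c (Python's lo/hi ints are nonnegative throughout, so Nat is exact and
-- (lo+hi)//2 is Nat division; y[mid] is always in range, ported as getD).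
-- (fuel is a totality guard only: hi - lo shrinks each iteration, and the caller passes
-- fuel = len(y) ≥ hi - lo, so the fuel never runs out)
def pvFindPos (y : List (List (String × Int))) (c : Int) : Nat → Nat → Nat → Nat
  | fuel + 1, lo, hi =>
    if lo < hi then
      -- mid = (lo + hi) // 2, inlined
      if c ≤ (((y.getD ((lo + hi) / 2) []).lookup "coef").getD 0 : Int) then
        pvFindPos y c fuel ((lo + hi) / 2 + 1) hi
      else pvFindPos y c fuel lo ((lo + hi) / 2)
    else lo
  | 0, lo, _ => lo

-- B: fold over enumerate(zip(a,b)), inserting each entry at its binary-searched position;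
-- the residual is a closed sum of mins.
def transformation_t_alt (a : List Int) (b : List Int) (k : Int) : (List (List (String × Int))) × Int :=
  let y := (PySem.List.enumerate (a.zip b)).foldl
    (fun y (p : Int × (Int × Int)) =>
      let e := [("iter", p.1),
                ("inv", if p.2.1 ≤ p.2.2 then (1 : Int) else 0),
                ("coef", |p.2.1 - p.2.2|)]
      let lo := pvFindPos y ((e.lookup "coef").getD 0) y.length 0 y.length
      PySem.List.insert y (lo : Int) e) []
  (y, k - ((a.zip b).map (fun p => min p.1 p.2)).sum)

-- ===== PRECONDITION & SPEC =====
-- Pre_ excludes inputs where len(b) < len(a): there A raises IndexError on b[i].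
def Pre_transformation_t (a : List Int) (b : List Int) (k : Int) : Prop := a.length ≤ b.length
instance (a : List Int) (b : List Int) (k : Int) : Decidable (Pre_transformation_t a b k) := by unfold Pre_transformation_t; infer_instance
def pvWitness_transformation_t : List Int × List Int × Int := ([3, 1], [2, 5], 7)

def Spec_transformation_t (a : List Int) (b : List Int) (k : Int) (out : (List (List (String × Int))) × Int) : Prop := out = transformation_t_alt a b k
instance (a : List Int) (b : List Int) (k : Int) (out : (List (List (String × Int))) × Int) : Decidable (Spec_transformation_t a b k out) := by unfold Spec_transformation_t; infer_instance

-- ===== CLAIM (what is proved, stated in full; the proofs are below) =====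
def Claim_equal_transformation_t : Prop := ∀ (a : List Int) (b : List Int) (k : Int), Dom_transformation_t a b k → Pre_transformation_t a b k → Spec_transformation_t a b k (transformation_t a b k)
-- ===== LEMMAS AND PROOFS =====

-- Characterise A's fold: it appends one entry per index and subtracts min(a[i],b[i]).
lemma loop_eq (a b : List Int) : ∀ (n : Nat) (acc : List (List (String × Int))) (d : Int),
    (List.range n).foldl
      (fun (st : (List (List (String × Int))) × Int) i =>
        let ai := a.getD i 0
        let bi := PySem.List.pyGetD b (i : Int) 0
        if ai > bi then
          (st.1 ++ [[("iter", (i : Int)), ("inv", 0), ("coef", ai - bi)]], st.2 - bi)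
        else
          (st.1 ++ [[("iter", (i : Int)), ("inv", 1), ("coef", bi - ai)]], st.2 - ai))
      (acc, d)
    = (acc ++ (List.range n).map (fun (i : Nat) =>
        [("iter", (i : Int)),
         ("inv", if a.getD i 0 ≤ b.getD i 0 then (1 : Int) else 0),
         ("coef", |a.getD i 0 - b.getD i 0|)]),
       d - ((List.range n).map
        (fun i => min (a.getD i 0) (b.getD i 0))).sum) := by
  intro n
  induction n with
  | zero => simp
  | succ n ih =>
    intro acc d
    rw [List.range_succ, List.foldl_append, ih]
    simp only [List.foldl_cons, List.foldl_nil, List.map_append, List.map_cons, List.map_nil,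
      List.sum_append, List.sum_cons, List.sum_nil, PySem.List.pyGetD_natCast]
    by_cases h : a.getD n 0 > b.getD n 0
    · simp only [h, if_true, if_neg (by omega : ¬ a.getD n 0 ≤ b.getD n 0),
        Prod.mk.injEq, List.append_assoc]
      refine ⟨by rw [abs_of_pos (by omega)], by omega⟩
    · simp only [h, if_false, if_pos (by omega : a.getD n 0 ≤ b.getD n 0),
        Prod.mk.injEq, List.append_assoc]
      refine ⟨by rw [abs_of_nonpos (by omega)]; ring_nf, by omega⟩

-- B's entry stream over enumerate(zip(a,b)) equals A's per-index entry list.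
lemma entries_eq : ∀ (a b : List Int) (s : Int), a.length ≤ b.length →
    (PySem.List.enumerate (a.zip b) s).map
      (fun p => [("iter", p.1),
                 ("inv", if p.2.1 ≤ p.2.2 then (1 : Int) else 0),
                 ("coef", |p.2.1 - p.2.2|)])
    = (List.range a.length).map (fun (i : Nat) =>
        [("iter", s + (i : Int)),
         ("inv", if a.getD i 0 ≤ b.getD i 0 then (1 : Int) else 0),
         ("coef", |a.getD i 0 - b.getD i 0|)]) := by
  intro a
  induction a with
  | nil => intro b s _; simp
  | cons x a' ih =>
    intro b s h
    cases b with
    | nil => simp at h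
    | cons y b' =>
      simp only [List.zip_cons_cons, PySem.List.enumerate_cons, List.map_cons,
        List.length_cons, List.range_succ_eq_map, List.map_map]
      rw [ih b' (s + 1) (by simpa using h)]
      refine congrArg₂ List.cons (by norm_num) ?_
      apply List.map_congr_left
      intro i _
      simp only [Function.comp_apply, List.getD_cons_succ]
      push_cast; ring_nf

-- entries_eq at start 0, with the iter field in A's plain form.
lemma entries_eq_zero (a b : List Int) (h : a.length ≤ b.length) :
    (PySem.List.enumerate (a.zip b)).map
      (fun p => [("iter", p.1),
                 ("inv", if p.2.1 ≤ p.2.2 then (1 : Int) else 0),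
                 ("coef", |p.2.1 - p.2.2|)])
    = (List.range a.length).map (fun (i : Nat) =>
        [("iter", (i : Int)),
         ("inv", if a.getD i 0 ≤ b.getD i 0 then (1 : Int) else 0),
         ("coef", |a.getD i 0 - b.getD i 0|)]) := by
  rw [entries_eq a b 0 h]
  simp

-- The residual sums agree: min over zipped pairs vs min over indices.
lemma mins_eq : ∀ (a b : List Int), a.length ≤ b.length →
    (a.zip b).map (fun p => min p.1 p.2)
    = (List.range a.length).map (fun i => min (a.getD i 0) (b.getD i 0)) := by
  intro a
  induction a with
  | nil => intro b _; simp
  | cons x a' ih =>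
    intro b h
    cases b with
    | nil => simp at h
    | cons y b' =>
      simp only [List.zip_cons_cons, List.map_cons, List.length_cons,
        List.range_succ_eq_map, List.map_map]
      rw [ih b' (by simpa using h)]
      simp [Function.comp]

-- Binary search on a coef-descending list: everything left of the result has coef ≥ c,
-- everything from the result on has coef < c.
lemma findPos_spec (y : List (List (String × Int))) (c : Int)
    (hdesc : y.Pairwise (fun u v => ((v.lookup "coef").getD 0 : Int) ≤ (u.lookup "coef").getD 0)) :
    ∀ (n lo hi : Nat), hi - lo ≤ n → lo ≤ hi → hi ≤ y.length →
    (∀ i (h : i < y.length), i < lo → c ≤ ((y[i].lookup "coef").getD 0 : Int)) →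
    (∀ i (h : i < y.length), hi ≤ i → ((y[i].lookup "coef").getD 0 : Int) < c) →
    pvFindPos y c n lo hi ≤ y.length ∧
    (∀ i (h : i < y.length), i < pvFindPos y c n lo hi → c ≤ ((y[i].lookup "coef").getD 0 : Int)) ∧
    (∀ i (h : i < y.length), pvFindPos y c n lo hi ≤ i → ((y[i].lookup "coef").getD 0 : Int) < c) := by
  have pw := List.pairwise_iff_getElem.mp hdesc
  intro n
  induction n with
  | zero =>
    intro lo hi h0 hle hlen hL hR
    simp only [pvFindPos]
    exact ⟨by omega, fun i h hi => hL i h hi, fun i h hge => hR i h (by omega)⟩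
  | succ n ih =>
    intro lo hi hn hle hlen hL hR
    by_cases hlt : lo < hi
    · simp only [pvFindPos]
      rw [if_pos hlt]
      have hmlen : (lo + hi) / 2 < y.length := by omega
      rw [List.getD_eq_getElem y [] hmlen]
      by_cases hc : c ≤ ((y[(lo + hi) / 2].lookup "coef").getD 0 : Int)
      · rw [if_pos hc]
        refine ih ((lo + hi) / 2 + 1) hi (by omega) (by omega) hlen ?_ hR
        intro i h hi_
        rcases Nat.lt_or_ge i ((lo + hi) / 2) with hlt2 | hge2
        · exact le_trans hc (pw i ((lo + hi) / 2) h hmlen hlt2)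
        · have : i = (lo + hi) / 2 := by omega
          subst this; exact hc
      · rw [if_neg hc]
        rw [not_le] at hc
        refine ih lo ((lo + hi) / 2) (by omega) (by omega) (by omega) hL ?_
        intro i h hge
        rcases Nat.lt_or_ge ((lo + hi) / 2) i with hlt2 | hge2
        · exact lt_of_le_of_lt (pw ((lo + hi) / 2) i hmlen h hlt2) hc
        · have : i = (lo + hi) / 2 := by omega
          subst this; exact hc
    · simp only [pvFindPos]
      rw [if_neg hlt]
      exact ⟨by omega, fun i h hi => hL i h hi, fun i h hge => hR i h (by omega)⟩

-- insertBy places x exactly at a position p whose left part refuses 'before' and whose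
-- boundary accepts it.
lemma insertBy_eq_take_drop {α : Type} (before : α → α → Bool) (x : α) :
    ∀ (ys : List α) (p : Nat), p ≤ ys.length →
    (∀ i (h : i < ys.length), i < p → before x ys[i] = false) →
    (∀ h : p < ys.length, before x ys[p] = true) →
    PySem.List.insertBy before x ys = ys.take p ++ x :: ys.drop p := by
  intro ys
  induction ys with
  | nil =>
    intro p hp _ _
    have : p = 0 := by simpa using hp
    subst this
    simp [PySem.List.insertBy]
  | cons z zs ih =>
    intro p hp hL hR
    cases p with
    | zero =>
      have hb : before x z = true := by simpa using hR (by simp)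
      simp [PySem.List.insertBy, hb]
    | succ p' =>
      have hb0 : before x z = false := by simpa using hL 0 (by simp) (by omega)
      simp only [PySem.List.insertBy, hb0, Bool.false_eq_true, if_false, List.take_succ_cons,
        List.drop_succ_cons, List.cons_append, List.cons.injEq, true_and]
      refine ih p' (by simpa using hp) ?_ ?_
      · intro i h hi
        simpa using hL (i + 1) (by simpa using Nat.succ_lt_succ h) (by omega)
      · intro h
        simpa using hR (by simpa using Nat.succ_lt_succ h)

-- On a coef-descending list, inserting at the binary-searched position is exactly PySem's
-- reverse insertion step for the coef key.
lemma binInsert_eq_insertBy (y : List (List (String × Int))) (e : List (String × Int))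
    (hdesc : y.Pairwise (fun u v => ((v.lookup "coef").getD 0 : Int) ≤ (u.lookup "coef").getD 0)) :
    PySem.List.insert y ((pvFindPos y ((e.lookup "coef").getD 0) y.length 0 y.length : Nat) : Int) e
      = PySem.List.insertBy
          (fun x z => decide (((z.lookup "coef").getD 0 : Int) < (x.lookup "coef").getD 0)) e y := by
  obtain ⟨h1, h2, h3⟩ := findPos_spec y ((e.lookup "coef").getD 0) hdesc y.length 0 y.length
    (by omega) (by omega) le_rfl (fun i h hi => absurd hi (by omega))
    (fun i h hge => absurd (lt_of_lt_of_le h hge) (lt_irrefl _))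
  rw [PySem.List.insert_natCast y _ e h1]
  rw [insertBy_eq_take_drop _ e y (pvFindPos y ((e.lookup "coef").getD 0) y.length 0 y.length) h1]
  · intro i h hi
    exact decide_eq_false (not_lt.mpr (h2 i h hi))
  · intro h
    exact decide_eq_true (h3 _ h le_rfl)

-- Folding B's binary insertion over any entry list yields exactly sorted(·, key=coef, reverse=True).
lemma foldl_bin_eq (es : List (List (String × Int))) :
    es.foldl (fun y e =>
        PySem.List.insert y ((pvFindPos y ((e.lookup "coef").getD 0) y.length 0 y.length : Nat) : Int) e) []
      = PySem.List.sorted es (fun item => ((item.lookup "coef").getD 0 : Int)) true := by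
  induction es using List.reverseRecOn with
  | nil => rfl
  | append_singleton es e ih =>
    rw [List.foldl_append, List.foldl_cons, List.foldl_nil, ih,
      PySem.List.sorted_rev_eq_foldl_insertBy (es ++ [e]), List.foldl_append,
      List.foldl_cons, List.foldl_nil, ← PySem.List.sorted_rev_eq_foldl_insertBy es]
    exact binInsert_eq_insertBy _ e (PySem.List.sorted_pairwise_rev es _)

-- ===== VERDICT (by name: the statement is the Claim_ definition above) =====
theorem transformation_t_spec : Claim_equal_transformation_t := by
  intro a b k _ hpre
  unfold Spec_transformation_t transformation_t transformation_t_alt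
  rw [loop_eq]
  simp only [List.nil_append]
  rw [← entries_eq_zero a b hpre, ← mins_eq a b hpre, ← foldl_bin_eq, List.foldl_map]
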